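-- pv_equiv track=rewrite | github.com/RAZZULLIX/raz | raz.py | sort_by_frequency_and_filter
-- ===== SOURCE A (Python) =====
-- def sort_by_frequency_and_filter(item_list):
--
--     #count the unique items
--     counts = count_unique_items(item_list)
--
--     #filter and sort the items by frequency (only items with frequency > 1)
--     filtered_sorted_items = sorted(
--         (item for item in counts.items() if item[1] > 1),
--         key=lambda x: x[1],
--         reverse=True
--     )
--
--     #convert tuples back to lists
--     sorted_lists = [list(item[0]) for item in filtered_sorted_items]
--
--     return sorted_lists
--
-- def count_unique_items(item_list):
--
--     unique_counts = {}
--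
--     for item in item_list:
--
--         #convert the unhashable item (e.g., list or dict) to a hashable type (e.g., tuple or frozenset)
--         hashable_item = tuple(item) if isinstance(item, list) else frozenset(item.items()) if isinstance(item, dict) else item
--
--         if hashable_item in unique_counts:
--             unique_counts[hashable_item] += 1
--         else:
--             unique_counts[hashable_item] = 1
--
--     #return the count of unique items
--     return unique_counts
-- ===== SOURCE B (Python) =====
-- def sort_by_frequency_and_filter(item_list):
--     # count occurrences (same hashable conversion as the original)
--     counts = {}
--     for item in item_list:
--         hashable_item = tuple(item) if isinstance(item, list) else frozenset(item.items()) if isinstance(item, dict) else item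
--         counts[hashable_item] = counts.get(hashable_item, 0) + 1
--
--     # highest frequency among the items that occur more than once
--     freqs = [c for c in counts.values() if c > 1]
--     max_freq = max(freqs, default=0)
--
--     # bucket the repeated keys by their frequency, keeping first-seen order
--     buckets = {}
--     for key, c in counts.items():
--         if c > 1:
--             buckets.setdefault(c, []).append(key)
--
--     # walk frequencies from high to low: descending order, stable ties, no sort
--     result = []
--     for f in range(max_freq, 1, -1):
--         for key in buckets.get(f, []):
--             result.append(list(key))
--     return result
-- ===== Notes on version B (the rewrite author's own statement) =====
-- stated objective: alternative
-- what changed: Replaces the comparison sort (sorted by count, reverse=True) with a counting/bucket pass: keys with count>1 are grouped into per-frequency buckets in first-seen order and emitted by walking frequencies from the maximum down to 2, so no sort is performed.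
import Mathlib
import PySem

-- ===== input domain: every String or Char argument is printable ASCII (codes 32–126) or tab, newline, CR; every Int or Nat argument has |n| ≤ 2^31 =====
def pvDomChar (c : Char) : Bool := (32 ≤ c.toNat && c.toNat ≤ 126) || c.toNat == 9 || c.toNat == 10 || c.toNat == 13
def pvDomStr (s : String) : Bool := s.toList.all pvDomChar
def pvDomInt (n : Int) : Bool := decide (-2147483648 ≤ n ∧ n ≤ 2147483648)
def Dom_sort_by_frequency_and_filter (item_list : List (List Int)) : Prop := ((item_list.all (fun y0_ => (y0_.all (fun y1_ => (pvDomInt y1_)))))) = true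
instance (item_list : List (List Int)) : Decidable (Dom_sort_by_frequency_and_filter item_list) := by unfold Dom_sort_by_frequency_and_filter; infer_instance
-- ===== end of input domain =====

-- B replaces the comparison sort with per-frequency buckets emitted from the highest
-- frequency down to 2 (same output, no sort): a genuinely different algorithm, similar cost.

-- ===== PORT A =====
-- count_unique_items: dict counting loop; tuple(item) is the identity on List Int here
def count_unique_items (item_list : List (List Int)) : PySem.Dict (List Int) Int :=
  item_list.foldl
    (fun d x => if d.contains x then d.insert x (d.getD x 0 + 1) else d.insert x 1)
    PySem.Dict.empty

def sort_by_frequency_and_filter (item_list : List (List Int)) : List (List Int) :=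
  let counts := count_unique_items item_list
  let filtered_sorted_items :=
    PySem.List.sorted (counts.items.filter (fun p => decide (1 < p.2))) (fun p => p.2) true
  -- list(item[0]) is the identity on List Int
  filtered_sorted_items.map (fun p => p.1)

-- ===== PORT B =====
def sort_by_frequency_and_filter_alt (item_list : List (List Int)) : List (List Int) :=
  let counts : PySem.Dict (List Int) Int :=
    item_list.foldl (fun d x => d.insert x (d.getD x 0 + 1)) PySem.Dict.empty
  let freqs := counts.values.filter (fun c => decide (1 < c))
  let max_freq : Int := match PySem.List.max? freqs (fun v => v) with | none => 0 | some m => m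
  -- buckets.setdefault(c, []).append(key)
  let buckets : PySem.Dict Int (List (List Int)) :=
    counts.items.foldl
      (fun d p => if decide (1 < p.2) then d.modify p.2 [] (fun l => l ++ [p.1]) else d)
      PySem.Dict.empty
  -- result loop; list(key) is the identity on List Int
  (PySem.List.pyRange max_freq 1 (-1)).foldl
    (fun acc f => (buckets.getD f []).foldl (fun acc2 k => acc2 ++ [k]) acc) []

-- ===== PRECONDITION & SPEC =====
def Spec_sort_by_frequency_and_filter (item_list : List (List Int)) (out : List (List Int)) : Prop := out = sort_by_frequency_and_filter_alt item_list
instance (item_list : List (List Int)) (out : List (List Int)) : Decidable (Spec_sort_by_frequency_and_filter item_list out) := by unfold Spec_sort_by_frequency_and_filter; infer_instance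

-- ===== CLAIM (what is proved, stated in full; the proofs are below) =====
def Claim_equal_sort_by_frequency_and_filter : Prop := ∀ (item_list : List (List Int)), Dom_sort_by_frequency_and_filter item_list → Spec_sort_by_frequency_and_filter item_list (sort_by_frequency_and_filter item_list)

-- ===== LEMMAS AND PROOFS =====

-- getD on a key the dict does not contain returns the default
theorem pv_getD_not_contains {κ ν : Type} [BEq κ] (d : PySem.Dict κ ν) (x : κ) (v : ν)
    (h : d.contains x = false) : d.getD x v = v := by
  simp only [PySem.Dict.getD, PySem.Dict.get?, PySem.Dict.contains] at *
  rw [List.find?_eq_none.mpr]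
  · rfl
  · intro p hp
    simp only [List.any_eq_false] at h
    exact h p hp

-- the two counting loops build the same dict
theorem pv_counts_eq (item_list : List (List Int)) :
    count_unique_items item_list
      = item_list.foldl (fun d x => d.insert x (d.getD x 0 + 1)) PySem.Dict.empty := by
  unfold count_unique_items
  apply PySem.List.foldl_congr_mem
  intro acc x _
  by_cases hc : acc.contains x
  · simp [hc]
  · simp only [Bool.not_eq_true] at hc
    simp [hc, pv_getD_not_contains acc x 0 hc]

-- filter of insertBy into a descending-by-key list: the new element lands after its ties
theorem pv_filter_insertBy {α : Type} (key : α → Int) (x : α) (acc : List α)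
    (h : acc.Pairwise (fun a b => key b ≤ key a)) (v : Int) :
    (PySem.List.insertBy (fun a b => decide (key b < key a)) x acc).filter (fun y => key y == v)
    = if key x == v then acc.filter (fun y => key y == v) ++ [x]
      else acc.filter (fun y => key y == v) := by
  induction acc with
  | nil => simp [PySem.List.insertBy]; split <;> simp_all
  | cons y ys ih =>
    rw [List.pairwise_cons] at h
    simp only [PySem.List.insertBy]
    by_cases hb : key y < key x
    · simp only [hb, decide_true, if_true]
      by_cases hv : key x == v
      · -- every element of y :: ys has key ≤ key y < key x = v, so the old filter is empty
        have hxe : (key x = v) := by simpa using hv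
        have hemp : (y :: ys).filter (fun z => key z == v) = [] := by
          rw [List.filter_eq_nil_iff]
          intro z hz
          have hzle : key z ≤ key y := by
            rcases hz with _ | hz'
            · exact le_refl _
            · exact h.1 z (by assumption)
          simp only [beq_iff_eq]
          omega
        simp [hemp, hxe]
      · simp only [hv]
        simp [List.filter_cons, hv]
    · simp only [hb, decide_false, Bool.false_eq_true, if_false, List.filter_cons, ih h.2]
      by_cases hv : key x == v <;> by_cases hy : key y == v <;> simp [hv, hy]

-- stability of Python's reverse sort: filtering at one key value preserves source order
theorem pv_filter_sorted_rev {α : Type} (key : α → Int) (xs : List α) (v : Int) :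
    (PySem.List.sorted xs key true).filter (fun y => key y == v)
      = xs.filter (fun y => key y == v) := by
  induction xs using List.reverseRecOn with
  | nil => rfl
  | append_singleton xs x ih =>
    have hstep : PySem.List.sorted (xs ++ [x]) key true
        = PySem.List.insertBy (fun a b => decide (key b < key a)) x
            (PySem.List.sorted xs key true) := by
      rw [PySem.List.sorted_rev_eq_foldl_insertBy, PySem.List.sorted_rev_eq_foldl_insertBy,
        List.foldl_append]
      rfl
    rw [hstep, pv_filter_insertBy key x _ (PySem.List.sorted_pairwise_rev xs key) v,
      List.filter_append, ih]
    by_cases hv : key x == v <;> simp [hv]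

-- uniqueness of a stable descending sort
theorem pv_stable_unique {α : Type} (key : α → Int) :
    ∀ (l₁ l₂ : List α), l₁.Perm l₂ →
      l₁.Pairwise (fun a b => key b ≤ key a) → l₂.Pairwise (fun a b => key b ≤ key a) →
      (∀ v : Int, l₁.filter (fun y => key y == v) = l₂.filter (fun y => key y == v)) →
      l₁ = l₂ := by
  intro l₁
  induction l₁ with
  | nil => intro l₂ hp _ _ _; exact (hp.symm.eq_nil).symm
  | cons a t₁ ih =>
    intro l₂ hp h₁ h₂ hfil
    cases l₂ with
    | nil => exact absurd hp.eq_nil (by simp)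
    | cons b t₂ =>
      rw [List.pairwise_cons] at h₁ h₂
      have hab : a = b := by
        have hak : key a ≤ key b := by
          have ha2 : a ∈ b :: t₂ := hp.mem_iff.mp (List.mem_cons_self)
          rcases ha2 with _ | ha2
          · exact le_refl _
          · exact h₂.1 a (by assumption)
        have hbk : key b ≤ key a := by
          have hb1 : b ∈ a :: t₁ := hp.symm.mem_iff.mp (List.mem_cons_self)
          rcases hb1 with _ | hb1
          · exact le_refl _
          · exact h₁.1 b (by assumption)
        have hkey : key a = key b := le_antisymm hak hbk
        have := hfil (key a)
        simp only [List.filter_cons, beq_self_eq_true, if_true, hkey, beq_self_eq_true] at this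
        exact (List.cons.injEq _ _ _ _ ▸ this).1
      subst hab
      have htail : t₁ = t₂ := by
        apply ih t₂ hp.cons_inv h₁.2 h₂.2
        intro v
        have := hfil v
        by_cases hv : key a == v
        · simpa only [List.filter_cons, hv, if_true, List.cons.injEq, true_and] using this
        · simpa only [List.filter_cons, hv, Bool.false_eq_true, if_false] using this
      rw [htail]

-- coverage over the empty value list forces the empty list
theorem pv_cov_nil {α : Type} (key : α → Int) (F : List α)
    (cov : ∀ p ∈ F, key p ∈ ([] : List Int)) : F = [] := by
  cases F with
  | nil => rfl
  | cons p t => exact absurd (cov p List.mem_cons_self) (by simp)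

-- restricting F to keys ≠ v does not change the bucket of any u ≠ v
theorem pv_filter_ne {α : Type} (key : α → Int) (F : List α) {u v : Int} (huv : u ≠ v) :
    (F.filter (fun y => !(key y == v))).filter (fun y => key y == u)
      = F.filter (fun y => key y == u) := by
  rw [List.filter_filter]
  apply List.filter_congr
  intro y _
  by_cases hy : key y = u
  · simp [hy, huv]
  · simp [hy]

-- the bucket concatenation is a permutation of the filtered items
theorem pv_flat_perm {α : Type} (key : α → Int) :
    ∀ (vs : List Int) (F : List α), vs.Nodup → (∀ p ∈ F, key p ∈ vs) →
      (vs.flatMap (fun v => F.filter (fun y => key y == v))).Perm F := by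
  intro vs
  induction vs with
  | nil => intro F _ cov; rw [pv_cov_nil key F cov]; simp
  | cons v vs' ih =>
    intro F hnd cov
    rw [List.nodup_cons] at hnd
    rw [List.flatMap_cons]
    have hcong : vs'.flatMap (fun u => F.filter (fun y => key y == u))
        = vs'.flatMap (fun u => (F.filter (fun y => !(key y == v))).filter
            (fun y => key y == u)) := by
      apply List.flatMap_congr
      intro u hu
      exact (pv_filter_ne key F (fun h => hnd.1 (by rw [← h]; exact hu))).symm
    rw [hcong]
    have hperm := ih (F.filter (fun y => !(key y == v))) hnd.2 (by
      intro p hpm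
      rw [List.mem_filter] at hpm
      have := cov p hpm.1
      cases this with
      | head => simp at hpm
      | tail _ h => exact h)
    exact (hperm.append_left _).trans (List.filter_append_perm _ F)

-- the bucket concatenation is descending by key
theorem pv_flat_pairwise {α : Type} (key : α → Int) (F : List α) :
    ∀ (vs : List Int), vs.Pairwise (· > ·) →
      (vs.flatMap (fun v => F.filter (fun y => key y == v))).Pairwise
        (fun a b => key b ≤ key a) := by
  intro vs
  induction vs with
  | nil => intro _; simp
  | cons v vs' ih =>
    intro hvs
    rw [List.pairwise_cons] at hvs
    rw [List.flatMap_cons, List.pairwise_append]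
    refine ⟨?_, ih hvs.2, ?_⟩
    · apply List.pairwise_of_forall_mem_list
      intro a ha b hb
      rw [List.mem_filter] at ha hb
      have : key a = v := by simpa using ha.2
      have : key b = v := by simpa using hb.2
      omega
    · intro a ha b hb
      rw [List.mem_filter] at ha
      have hka : key a = v := by simpa using ha.2
      rw [List.mem_flatMap] at hb
      obtain ⟨u, hu, hbm⟩ := hb
      rw [List.mem_filter] at hbm
      have hkb : key b = u := by simpa using hbm.2
      have : v > u := hvs.1 u hu
      omega

-- the bucket concatenation is stable
theorem pv_flat_filter {α : Type} (key : α → Int) :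
    ∀ (vs : List Int) (F : List α), vs.Nodup → (∀ p ∈ F, key p ∈ vs) → ∀ w : Int,
      (vs.flatMap (fun v => F.filter (fun y => key y == v))).filter (fun y => key y == w)
        = F.filter (fun y => key y == w) := by
  intro vs
  induction vs with
  | nil => intro F _ cov w; rw [pv_cov_nil key F cov]; simp
  | cons v vs' ih =>
    intro F hnd cov w
    rw [List.nodup_cons] at hnd
    rw [List.flatMap_cons, List.filter_append]
    have hcong : vs'.flatMap (fun u => F.filter (fun y => key y == u))
        = vs'.flatMap (fun u => (F.filter (fun y => !(key y == v))).filter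
            (fun y => key y == u)) := by
      apply List.flatMap_congr
      intro u hu
      exact (pv_filter_ne key F (fun h => hnd.1 (by rw [← h]; exact hu))).symm
    have hcov' : ∀ p ∈ F.filter (fun y => !(key y == v)), key p ∈ vs' := by
      intro p hpm
      rw [List.mem_filter] at hpm
      have := cov p hpm.1
      cases this with
      | head => simp at hpm
      | tail _ h => exact h
    rw [hcong, ih (F.filter (fun y => !(key y == v))) hnd.2 hcov' w]
    by_cases hw : w = v
    · subst hw
      have h1 : (F.filter (fun y => key y == w)).filter (fun y => key y == w)
          = F.filter (fun y => key y == w) := by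
        rw [List.filter_filter]; apply List.filter_congr; intro y _; simp
      have h2 : (F.filter (fun y => !(key y == w))).filter (fun y => key y == w) = [] := by
        rw [List.filter_filter, List.filter_eq_nil_iff]; intro y _; simp
      rw [h1, h2, List.append_nil]
    · have h1 : (F.filter (fun y => key y == v)).filter (fun y => key y == w) = [] := by
        rw [List.filter_filter, List.filter_eq_nil_iff]; intro y _; simp; omega
      rw [h1, pv_filter_ne key F hw, List.nil_append]

-- MAIN: the stable reverse sort equals the bucket concatenation
theorem pv_sorted_eq_flat {α : Type} (key : α → Int) (F : List α) (vs : List Int)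
    (hvs : vs.Pairwise (· > ·)) (cov : ∀ p ∈ F, key p ∈ vs) :
    PySem.List.sorted F key true = vs.flatMap (fun v => F.filter (fun y => key y == v)) := by
  have hnd : vs.Nodup := (hvs.imp (fun h => ne_of_gt h))
  exact pv_stable_unique key _ _
    ((PySem.List.sorted_perm F key true).trans (pv_flat_perm key vs F hnd cov).symm)
    (PySem.List.sorted_pairwise_rev F key)
    (pv_flat_pairwise key F vs hvs)
    (fun v => by rw [pv_filter_sorted_rev, pv_flat_filter key vs F hnd cov])

-- the bucket dict of B, read back: keys in first-seen order within each frequency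
theorem pv_buckets_getD (F : List ((List Int) × Int)) (c : Int) :
    (F.foldl (fun d p => d.modify p.2 [] (fun l => l ++ [p.1])) PySem.Dict.empty).getD c []
      = (F.filter (fun p => p.2 == c)).map (fun p => p.1) := by
  have h1 : F.foldl (fun d p => d.modify p.2 [] (fun l => l ++ [p.1])) PySem.Dict.empty
      = (F.map Prod.swap).foldl (fun d p => d.modify p.1 [] (fun l => l ++ [p.2]))
          PySem.Dict.empty := by
    rw [List.foldl_map]
    simp only [Prod.fst_swap, Prod.snd_swap]
  rw [h1, PySem.Dict.getD_foldl_modify_append, List.filter_map, List.map_map]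
  have hemp : (PySem.Dict.empty : PySem.Dict Int (List (List Int))).getD c [] = [] := rfl
  rw [hemp, List.nil_append]
  simp only [Function.comp_def, Prod.fst_swap, Prod.snd_swap]

-- every filtered count lies in the emitted frequency range
theorem pv_cov (C : PySem.Dict (List Int) Int) (p : (List Int) × Int)
    (hp : p ∈ C.items.filter (fun q => decide (1 < q.2))) :
    p.2 ∈ PySem.List.pyRange
      (match PySem.List.max? (C.values.filter (fun c => decide (1 < c))) (fun v => v) with
       | none => 0 | some m => m) 1 (-1) := by
  rw [List.mem_filter] at hp
  have h2 : (1 : Int) < p.2 := by simpa using hp.2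
  have hmem : p.2 ∈ C.values.filter (fun c => decide (1 < c)) := by
    rw [List.mem_filter]
    exact ⟨List.mem_map_of_mem hp.1, by simpa using h2⟩
  rw [PySem.List.mem_pyRange_neg_one]
  refine ⟨h2, ?_⟩
  cases hmax : PySem.List.max? (C.values.filter (fun c => decide (1 < c))) (fun v => v) with
  | none =>
    rw [PySem.List.max?_eq_none_iff] at hmax
    rw [hmax] at hmem
    simp at hmem
  | some m => exact PySem.List.max?_isMax hmax p.2 hmem

theorem pv_main (xs : List (List Int)) :
    sort_by_frequency_and_filter xs = sort_by_frequency_and_filter_alt xs := by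
  simp only [sort_by_frequency_and_filter, sort_by_frequency_and_filter_alt, pv_counts_eq,
    PySem.List.foldl_if_eq_foldl_filter, PySem.List.foldl_append_singleton_eq_self,
    pv_buckets_getD, PySem.List.foldl_append_eq_flatMap, List.nil_append]
  rw [← List.map_flatMap]
  refine congrArg (List.map _)
    (pv_sorted_eq_flat (fun p : (List Int) × Int => p.2) _ _ ?_ (fun p hp => pv_cov _ p hp))
  rw [PySem.List.pyRange_neg_one_eq_reverse, List.pairwise_reverse]
  exact PySem.List.pairwise_lt_pyRange_one _ _

-- ===== VERDICT (by name: the statement is the Claim_ definition above) =====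
theorem sort_by_frequency_and_filter_spec : Claim_equal_sort_by_frequency_and_filter := by
  intro xs _
  exact pv_main xs
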